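-- pv_equiv track=rewrite | github.com/jdw0069/fetch | rules/rule4.py | everyTwoItems
-- ===== SOURCE A (Python) =====
-- def everyTwoItems(itemsList):
--     total = 0
--     points = 0
--     for i in itemsList:
--         total += 1
--         if total % 2 == 0:
--             points += 5
--     return points
-- ===== SOURCE B (Python) =====
-- def everyTwoItems(itemsList):
--     return 5 * (len(itemsList) // 2)
-- ===== Notes on version B (the rewrite author's own statement) =====
-- stated objective: faster
-- what changed: Replaced the per-item counting loop with the closed form 5 * (len(itemsList) // 2).
import Mathlib
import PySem

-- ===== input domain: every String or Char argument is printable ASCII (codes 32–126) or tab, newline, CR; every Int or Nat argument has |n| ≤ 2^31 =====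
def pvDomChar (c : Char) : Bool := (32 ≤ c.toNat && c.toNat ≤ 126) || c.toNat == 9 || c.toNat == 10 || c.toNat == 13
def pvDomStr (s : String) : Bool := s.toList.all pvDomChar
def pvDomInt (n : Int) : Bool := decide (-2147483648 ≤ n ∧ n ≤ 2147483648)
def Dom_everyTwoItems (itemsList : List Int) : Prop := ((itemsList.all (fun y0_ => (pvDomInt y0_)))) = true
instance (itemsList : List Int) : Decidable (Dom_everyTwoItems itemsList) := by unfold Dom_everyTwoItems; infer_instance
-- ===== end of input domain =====

-- B replaces A's per-item counting loop with the closed form 5 * (len // 2) (faster, O(1)).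


-- ===== PORT A =====
-- loop state: (total, points), both start at 0
def everyTwoItems (itemsList : List Int) : Int :=
  (itemsList.foldl
    (fun (s : Int × Int) _ =>
      let total := s.1 + 1
      let points := if PySem.Int.mod total 2 = 0 then s.2 + 5 else s.2
      (total, points))
    (0, 0)).2

-- ===== PORT B =====
def everyTwoItems_alt (itemsList : List Int) : Int :=
  5 * ((itemsList.length : Int) / 2)

-- ===== PRECONDITION & SPEC =====
def Spec_everyTwoItems (itemsList : List Int) (out : Int) : Prop := out = everyTwoItems_alt itemsList
instance (itemsList : List Int) (out : Int) : Decidable (Spec_everyTwoItems itemsList out) := by unfold Spec_everyTwoItems; infer_instance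

-- ===== CLAIM (what is proved, stated in full; the proofs are below) =====
def Claim_equal_everyTwoItems : Prop := ∀ (itemsList : List Int), Dom_everyTwoItems itemsList → Spec_everyTwoItems itemsList (everyTwoItems itemsList)

-- ===== LEMMAS AND PROOFS =====
-- Invariant of A's fold, started from a natural counter n and accumulator p.
theorem everyTwoItems_fold_inv (l : List Int) (n : ℕ) (p : Int) :
    (l.foldl
      (fun (s : Int × Int) _ =>
        let total := s.1 + 1
        let points := if PySem.Int.mod total 2 = 0 then s.2 + 5 else s.2
        (total, points))
      ((n : Int), p)).2
      = p + 5 * (((n + l.length) / 2 : ℕ) - ((n / 2 : ℕ) : Int)) := by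
  induction l generalizing n p with
  | nil => simp
  | cons x xs ih =>
    simp only [List.foldl_cons, List.length_cons]
    have h1 : ((n : Int) + 1) = ((n + 1 : ℕ) : Int) := by push_cast; ring
    rw [h1, ih (n + 1)]
    by_cases h : (2 : Int) ∣ ((n + 1 : ℕ) : Int)
    · rw [if_pos ((PySem.Int.mod_eq_zero_iff_dvd _ _).mpr h)]
      have hn : 2 ∣ (n + 1) := by exact_mod_cast h
      omega
    · rw [if_neg (fun hc => h ((PySem.Int.mod_eq_zero_iff_dvd _ _).mp hc))]
      have hn : ¬ 2 ∣ (n + 1) := fun hd => h (by exact_mod_cast hd)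
      omega

-- ===== VERDICT (by name: the statement is the Claim_ definition above) =====
theorem everyTwoItems_spec : Claim_equal_everyTwoItems := by
  intro l _
  show _ = _
  unfold everyTwoItems everyTwoItems_alt
  have := everyTwoItems_fold_inv l 0 0
  simp only [Nat.cast_zero, Nat.zero_add, zero_add] at this ⊢
  rw [this]
  omega
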